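-- pv_equiv track=rewrite | github.com/ap0072/elective_4 | 01-numberofpoolballrows-Python/numberofpoolballrows.py | fun_numberofpoolballrows
-- ===== SOURCE A (Python) =====
-- def fun_numberofpoolballrows(balls):
-- 	if balls==0:
-- 		return 0
-- 	k=1
-- 	l=[]
-- 	l2=[]
-- 	l3=[]
-- 	for i in range(1,balls+1):
-- 		l.append(i)
--
--
-- 	while(k<=balls):
-- 		try:
-- 			if k>len(l):
-- 				for z in range(len(l)):
-- 					l2.append(l[z])
-- 			else:
-- 				for z in range(k):
-- 					l2.append(l[z])
-- 		except:
-- 			pass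
-- 		l3.append(l2)
-- 		l2=[]
-- 		l=l[k:]
-- 		k=k+1
-- 	fl=0
-- 	for i in l3:
-- 		if len(i)!=0:
-- 			fl=fl+1
-- 	return fl
-- ===== SOURCE B (Python) =====
-- def fun_numberofpoolballrows(balls):
--     # Binary search for the smallest n with n*(n+1)//2 >= balls.
--     if balls <= 0:
--         return 0
--     lo, hi = 0, balls
--     while lo < hi:
--         mid = (lo + hi) // 2
--         if mid * (mid + 1) // 2 >= balls:
--             hi = mid
--         else:
--             lo = mid + 1
--     return lo
-- ===== Notes on version B (the rewrite author's own statement) =====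
-- stated objective: faster
-- what changed: Replaces the O(balls^2) simulation (building lists of balls, slicing off a growing row each iteration, then counting nonempty rows) by a binary search for the smallest n with n*(n+1)//2 >= balls.
import Mathlib
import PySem

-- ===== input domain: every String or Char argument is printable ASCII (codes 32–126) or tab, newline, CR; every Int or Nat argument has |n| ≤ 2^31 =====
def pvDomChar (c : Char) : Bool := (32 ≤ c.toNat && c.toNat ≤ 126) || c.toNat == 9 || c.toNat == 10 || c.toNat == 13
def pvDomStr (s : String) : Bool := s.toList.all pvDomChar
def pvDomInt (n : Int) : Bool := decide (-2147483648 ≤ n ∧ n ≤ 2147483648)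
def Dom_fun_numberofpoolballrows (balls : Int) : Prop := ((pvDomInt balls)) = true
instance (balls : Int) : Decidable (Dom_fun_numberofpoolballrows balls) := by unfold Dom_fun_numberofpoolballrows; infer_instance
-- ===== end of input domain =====

-- B replaces A's O(balls^2) list simulation by an O(log balls) binary search for the
-- smallest n with n*(n+1)//2 >= balls (same return value everywhere).


-- ===== PORT A =====
-- the try/except-pass around the index loop is ported via Option.toList (an out-of-range
-- index contributes nothing); exact here since every index z used is in range.
def pvChunk (l : List Int) (k : Int) : List Int :=
  if k > (l.length : Int) then
    (PySem.List.pyRange 0 (l.length : Int) 1).foldl (fun l2 z => l2 ++ (PySem.List.pyGet? l z).toList) []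
  else
    (PySem.List.pyRange 0 k 1).foldl (fun l2 z => l2 ++ (PySem.List.pyGet? l z).toList) []

-- termination fact for pvALoop (named so the recursion cites it)
lemma pvALoopDec (balls k : Int) (h : k ≤ balls) :
    (balls + 1 - (k + 1)).toNat < (balls + 1 - k).toNat := by omega

def pvALoop (balls k : Int) (l : List Int) (l3 : List (List Int)) : List (List Int) :=
  if k ≤ balls then
    pvALoop balls (k + 1) (PySem.List.slice l (some k) none) (l3 ++ [pvChunk l k])
  else l3
termination_by (balls + 1 - k).toNat
decreasing_by exact pvALoopDec balls k ‹_›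

def fun_numberofpoolballrows (balls : Int) : Int :=
  if balls == 0 then 0
  else
    let l := PySem.List.pyRange 1 (balls + 1) 1
    let l3 := pvALoop balls 1 l []
    l3.foldl (fun fl i => if (i.length : Int) ≠ 0 then fl + 1 else fl) 0

-- ===== PORT B =====
-- termination facts for pvBSearch (named so the recursion cites them)
lemma pvBSearchDec1 (lo hi : Int) (h : lo < hi) :
    (PySem.Int.floordiv (lo + hi) 2 - lo).toNat < (hi - lo).toNat := by
  have hm := (PySem.Int.floordiv_lt_iff_lt_mul (a := lo + hi) (b := 2) (q := hi) (by omega)).mpr (by omega)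
  omega

lemma pvBSearchDec2 (lo hi : Int) (h : lo < hi) :
    (hi - (PySem.Int.floordiv (lo + hi) 2 + 1)).toNat < (hi - lo).toNat := by
  have hm := PySem.Int.floordiv_two_mid_bounds (lo := lo) (hi := hi) (by omega)
  omega

def pvBSearch (balls lo hi : Int) : Int :=
  if lo < hi then
    let mid := PySem.Int.floordiv (lo + hi) 2
    if PySem.Int.floordiv (mid * (mid + 1)) 2 ≥ balls then pvBSearch balls lo mid
    else pvBSearch balls (mid + 1) hi
  else lo
termination_by (hi - lo).toNat
decreasing_by
  · exact pvBSearchDec1 lo hi (by omega)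
  · exact pvBSearchDec2 lo hi (by omega)

def fun_numberofpoolballrows_alt (balls : Int) : Int :=
  if balls ≤ 0 then 0 else pvBSearch balls 0 balls

-- ===== PRECONDITION & SPEC =====
def Spec_fun_numberofpoolballrows (balls : Int) (out : Int) : Prop := out = fun_numberofpoolballrows_alt balls
instance (balls : Int) (out : Int) : Decidable (Spec_fun_numberofpoolballrows balls out) := by unfold Spec_fun_numberofpoolballrows; infer_instance

-- ===== CLAIM (what is proved, stated in full; the proofs are below) =====
def Claim_equal_fun_numberofpoolballrows : Prop := ∀ (balls : Int), Dom_fun_numberofpoolballrows balls → Spec_fun_numberofpoolballrows balls (fun_numberofpoolballrows balls)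

-- ===== LEMMAS AND PROOFS =====

-- T n = n*(n+1)//2 as computed by B
def pvT (n : Int) : Int := PySem.Int.floordiv (n * (n + 1)) 2

lemma pvT_two (n : Int) : 2 * pvT n = n * (n + 1) := by
  have hdvd : (2 : Int) ∣ n * (n + 1) := (Int.even_mul_succ_self n).two_dvd
  have h := PySem.Int.floordiv_mul_add_mod (n * (n + 1)) 2
  have hm : PySem.Int.mod (n * (n + 1)) 2 = 0 :=
    (PySem.Int.mod_eq_zero_iff_dvd _ _).mpr hdvd
  unfold pvT; omega

lemma pvT_mono {a b : Int} (h0 : 0 ≤ a) (hab : a ≤ b) : pvT a ≤ pvT b := by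
  have ha := pvT_two a
  have hb := pvT_two b
  nlinarith

lemma pvT_step (k : Int) : pvT k = pvT (k - 1) + k := by
  have h1 := pvT_two k
  have h2 := pvT_two (k - 1)
  nlinarith

-- the number of rows the greedy filling uses: m balls remaining, next row holds k balls
def pvG (m k : Nat) : Nat :=
  if m = 0 then 0 else 1 + pvG (m - max k 1) (k + 1)
termination_by m
decreasing_by omega

lemma pvG_zero (k : Nat) : pvG 0 k = 0 := by rw [pvG]; simp

lemma pvG_pos (m k : Nat) (hm : 1 ≤ m) (hk : 1 ≤ k) :
    pvG m k = 1 + pvG (m - k) (k + 1) := by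
  rw [pvG, if_neg (by omega : ¬ m = 0), Nat.max_eq_left hk]

lemma pvG_le (m k : Nat) (hk : 1 ≤ k) : pvG m k ≤ m := by
  by_cases hm : m = 0
  · subst hm; simp [pvG_zero]
  · rw [pvG_pos m k (by omega) hk]
    have ih := pvG_le (m - k) (k + 1) (by omega)
    omega
termination_by m

-- characterisation of pvG: it is the least number of further rows
lemma pvG_char (m k : Nat) (hm : 1 ≤ m) (hk : 1 ≤ k) :
    pvT ((k : Int) - 1) + m ≤ pvT ((k : Int) - 1 + pvG m k) ∧
    pvT ((k : Int) - 2 + pvG m k) < pvT ((k : Int) - 1) + m := by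
  have hstep := pvT_step (k : Int)
  rw [pvG_pos m k hm hk]
  by_cases hmk : m ≤ k
  · have h0 : m - k = 0 := by omega
    rw [h0, pvG_zero]
    push_cast
    constructor
    · have e : (k : Int) - 1 + 1 = (k : Int) := by ring
      rw [e]; omega
    · have e : (k : Int) - 2 + 1 = (k : Int) - 1 := by ring
      rw [e]; omega
  · have ih := pvG_char (m - k) (k + 1) (by omega) (by omega)
    push_cast at ih ⊢
    have e3 : ((m - k : Nat) : Int) = (m : Int) - k := by omega
    have e2 : (k : Int) + 1 - 2 + (pvG (m - k) (k + 1) : Int) = (k : Int) - 2 + (1 + pvG (m - k) (k + 1)) := by ring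
    have e1 : (k : Int) + (pvG (m - k) (k + 1) : Int) = (k : Int) - 1 + (1 + pvG (m - k) (k + 1)) := by ring
    rw [e3, e2] at ih
    rw [show ((k : Int) + 1 - 1) = (k : Int) from by ring] at ih
    rw [e1] at ih
    omega
termination_by m
decreasing_by omega

-- B's binary search lands on the least n with balls ≤ pvT n
lemma pvBSearch_spec (balls lo hi : Int) (h0 : 0 ≤ lo) (hlh : lo ≤ hi)
    (hhi : balls ≤ pvT hi) (hlo : lo = 0 ∨ pvT (lo - 1) < balls) :
    0 ≤ pvBSearch balls lo hi ∧ balls ≤ pvT (pvBSearch balls lo hi) ∧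
      (pvBSearch balls lo hi = 0 ∨ pvT (pvBSearch balls lo hi - 1) < balls) := by
  rw [pvBSearch]
  dsimp only
  split
  · next hlt =>
    have hmid := PySem.Int.floordiv_two_mid_bounds (lo := lo) (hi := hi) (by omega)
    have hmidlt : PySem.Int.floordiv (lo + hi) 2 < hi :=
      (PySem.Int.floordiv_lt_iff_lt_mul (a := lo + hi) (b := 2) (q := hi) (by omega)).mpr (by omega)
    split
    · next hge =>
      exact pvBSearch_spec balls lo (PySem.Int.floordiv (lo + hi) 2) h0 (by omega) hge hlo
    · next hnge =>
      have hlt' : pvT (PySem.Int.floordiv (lo + hi) 2) < balls := lt_of_not_ge hnge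
      refine pvBSearch_spec balls (PySem.Int.floordiv (lo + hi) 2 + 1) hi (by omega) (by omega) hhi (Or.inr ?_)
      simpa using hlt'
  · next _ =>
    have heq : lo = hi := by omega
    subst heq
    exact ⟨h0, hhi, hlo⟩
termination_by (hi - lo).toNat
decreasing_by
  · exact pvBSearchDec2 lo hi (by omega)
  · exact pvBSearchDec1 lo hi (by omega)

lemma pvT_unique (balls n1 n2 : Int)
    (h1 : 0 ≤ n1 ∧ balls ≤ pvT n1 ∧ (n1 = 0 ∨ pvT (n1 - 1) < balls))
    (h2 : 0 ≤ n2 ∧ balls ≤ pvT n2 ∧ (n2 = 0 ∨ pvT (n2 - 1) < balls)) : n1 = n2 := by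
  have hT0 : pvT 0 = 0 := by decide
  by_contra hne
  rcases lt_or_gt_of_ne hne with hlt | hlt
  · rcases h2.2.2 with h | h
    · have := h1.2.1
      omega
    · have hmono := pvT_mono (a := n1) (b := n2 - 1) h1.1 (by omega)
      have := h1.2.1
      omega
  · rcases h1.2.2 with h | h
    · have := h2.2.1
      omega
    · have hmono := pvT_mono (a := n2) (b := n1 - 1) h2.1 (by omega)
      have := h2.2.1
      omega

-- counting the nonempty chunks
def pvCountNE (l3 : List (List Int)) : Int :=
  l3.foldl (fun fl i => if (i.length : Int) ≠ 0 then fl + 1 else fl) 0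

lemma pvCountNE_append (l3 : List (List Int)) (c : List Int) :
    pvCountNE (l3 ++ [c]) = pvCountNE l3 + (if c = [] then 0 else 1) := by
  simp [pvCountNE, List.foldl_append]
  by_cases hc : c = [] <;> simp [hc]

lemma pvGet_zero_cons (x : Int) (xs : List Int) :
    PySem.List.pyGet? (x :: xs) 0 = some x := by
  simp [PySem.List.pyGet?, PySem.List.pyIdx?]

lemma pvChunk_nil (k : Int) (hk : 1 ≤ k) : pvChunk ([] : List Int) k = [] := by
  unfold pvChunk
  rw [if_pos (by simp; omega)]
  rw [show ((List.length ([] : List Int) : Int)) = 0 by simp]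
  rw [PySem.List.pyRange_one_eq_nil (by omega)]
  rfl

lemma pvChunk_cons_ne (x : Int) (xs : List Int) (k : Int) (hk : 1 ≤ k) :
    pvChunk (x :: xs) k ≠ [] := by
  unfold pvChunk
  intro h
  have hx : ∀ (r : List Int), (0 : Int) ∈ r →
      x ∈ r.foldl (fun l2 z => l2 ++ (PySem.List.pyGet? (x :: xs) z).toList) [] := by
    intro r hr
    rw [PySem.List.foldl_append_eq_flatMap]
    simp only [List.nil_append]
    exact List.mem_flatMap.mpr ⟨0, hr, by rw [pvGet_zero_cons]; simp⟩
  split at h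
  · exact absurd h (List.ne_nil_of_mem (hx _ (by
      rw [PySem.List.mem_pyRange_one]; simp)))
  · exact absurd h (List.ne_nil_of_mem (hx _ (by
      rw [PySem.List.mem_pyRange_one]; omega)))

lemma pvChunk_eq_nil_iff (l : List Int) (k : Int) (hk : 1 ≤ k) :
    pvChunk l k = [] ↔ l = [] := by
  cases l with
  | nil => simp [pvChunk_nil k hk]
  | cons x xs => simp [pvChunk_cons_ne x xs k hk]

lemma pvALoop_count (balls k : Int) (l : List Int) (l3 : List (List Int))
    (hk : 1 ≤ k) (hg : (pvG l.length k.toNat : Int) ≤ balls + 1 - k) :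
    pvCountNE (pvALoop balls k l l3) = pvCountNE l3 + pvG l.length k.toNat := by
  rw [pvALoop]
  split
  · next hkb =>
    have hslice : PySem.List.slice l (some k) none = l.drop k.toNat :=
      PySem.List.slice_from l (by omega)
    by_cases hl : l = []
    · subst hl
      rw [pvALoop_count balls (k + 1) _ _ (by omega) (by rw [hslice]; simp [pvG_zero]; omega)]
      rw [hslice]
      simp [pvCountNE_append, pvChunk_nil k hk, pvG_zero]
    · have hlen : 1 ≤ l.length := List.length_pos_of_ne_nil hl
      have hkt : 1 ≤ k.toNat := by omega
      have hgp : pvG l.length k.toNat = 1 + pvG (l.length - k.toNat) (k.toNat + 1) :=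
        pvG_pos _ _ hlen hkt
      have hlen' : (l.drop k.toNat).length = l.length - k.toNat := by simp
      have hk1 : (k + 1).toNat = k.toNat + 1 := by omega
      rw [pvALoop_count balls (k + 1) _ _ (by omega)
        (by rw [hslice, hlen', hk1]; rw [hgp] at hg; push_cast at hg ⊢; omega)]
      rw [hslice, hlen', hk1, pvCountNE_append, hgp]
      rw [if_neg (by rw [pvChunk_eq_nil_iff _ _ hk]; exact hl)]
      push_cast
      ring
  · next hkb =>
    have hnn : 0 ≤ (pvG l.length k.toNat : Int) := by positivity
    have hz : pvG l.length k.toNat = 0 := by omega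
    rw [hz]; simp
termination_by (balls + 1 - k).toNat
decreasing_by all_goals omega

-- A's value for positive balls is the greedy row count
lemma funA_pos (balls : Int) (hb : 1 ≤ balls) :
    fun_numberofpoolballrows balls = (pvG balls.toNat 1 : Int) := by
  unfold fun_numberofpoolballrows
  rw [if_neg (by simp; omega)]
  have hlen : (PySem.List.pyRange 1 (balls + 1) 1).length = balls.toNat := by
    rw [PySem.List.length_pyRange_one]; omega
  have hle := pvG_le balls.toNat 1 (by omega)
  have h := pvALoop_count balls 1 (PySem.List.pyRange 1 (balls + 1) 1) []
    (by omega) (by rw [hlen]; simp; omega)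
  simpa [pvCountNE, hlen] using h

-- ===== VERDICT (by name: the statement is the Claim_ definition above) =====
theorem fun_numberofpoolballrows_spec : Claim_equal_fun_numberofpoolballrows := by
  intro balls _
  unfold Spec_fun_numberofpoolballrows fun_numberofpoolballrows_alt
  by_cases hb : balls ≤ 0
  · rw [if_pos hb]
    unfold fun_numberofpoolballrows
    by_cases h0 : balls = 0
    · simp [h0]
    · rw [if_neg (by simpa using h0)]
      have hloop : pvALoop balls 1 (PySem.List.pyRange 1 (balls + 1) 1) [] = [] := by
        rw [pvALoop, if_neg (by omega)]
      simp [hloop]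
  · rw [if_neg hb]
    have hb1 : 1 ≤ balls := by omega
    rw [funA_pos balls hb1]
    have hT0 : pvT 0 = 0 := by decide
    have hchar := pvG_char balls.toNat 1 (by omega) (by omega)
    have hcast : ((balls.toNat : Nat) : Int) = balls := by omega
    have e1 : ((1 : Nat) : Int) - 1 + (pvG balls.toNat 1 : Int) = (pvG balls.toNat 1 : Int) := by omega
    have e2 : ((1 : Nat) : Int) - 2 + (pvG balls.toNat 1 : Int) = (pvG balls.toNat 1 : Int) - 1 := by omega
    have e3 : ((1 : Nat) : Int) - 1 = 0 := by omega
    rw [e1, e2, e3, hT0, hcast] at hchar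
    have hTb : balls ≤ pvT balls := by
      have h := pvT_two balls
      nlinarith
    have hB := pvBSearch_spec balls 0 balls (by omega) (by omega) hTb (Or.inl rfl)
    exact pvT_unique balls _ _ ⟨by positivity, by omega, Or.inr (by omega)⟩ hB
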